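-- pv_equiv track=rewrite | github.com/sfdelgadop/Lenguajes-de-Programacion | AnalizadorLdP.py | lasts
-- ===== SOURCE A (Python) =====
-- def firsts(grammar):
--     firsts_sets = {}
--     for i in range(len(grammar)):
--         firsts_sets.setdefault(grammar[i][0], set())
--     flag = True
--     while flag:
--         flag = False
--         for i in range(len(grammar)):
--             for j in range(1, len(grammar[i])):
--                 if grammar[i][j] in firsts_sets:
--                     if grammar[i][j] != grammar[i][0]:
--                         if j < len(grammar[i])-1:
--                             temp = firsts_sets.pop(grammar[i][0])
--                             temp2 = firsts_sets.get(grammar[i][j]).copy()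
--                             if "0" in temp2:
--                                 temp2.remove("0")
--                             temp3 = temp.union(temp2)
--                             if temp != temp3:
--                                 flag = True
--                             firsts_sets.setdefault(grammar[i][0], temp3)
--                         else:
--                             temp = firsts_sets.pop(grammar[i][0])
--                             temp2 = firsts_sets.get(grammar[i][j]).union(temp)
--                             if temp != temp2:
--                                 flag = True
--                             firsts_sets.setdefault(grammar[i][0], temp2)
--
--                     if "0" not in firsts_sets.get(grammar[i][j]):
--                         break
--                 else:
--                     temp = firsts_sets.pop(grammar[i][0])
--                     temp2 = temp.union({grammar[i][j]})
--                     if temp != temp2: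
--                         flag = True
--                     firsts_sets.setdefault(grammar[i][0], temp2)
--                     break
--     return firsts_sets
--
-- def lasts(grammar):
--     lasts_sets = {}
--     firsts_sets = firsts(grammar)
--     for i in range(len(grammar)):
--         lasts_sets.setdefault(grammar[i][0], set())
--     temp = lasts_sets.pop(grammar[0][0])
--     temp2 = temp.union({"$"})
--     lasts_sets.setdefault(grammar[0][0], temp2)
--     flag = True
--     while flag:
--         flag = False
--         for i in range(len(grammar)):
--             for j in range(1, len(grammar[i])):
--                 if grammar[i][j] in lasts_sets:
--                     if j < len(grammar[i])-1:
--                         flag2 = False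
--                         for k in range(j+1, len(grammar[i])):
--                             flag2 = False
--                             if grammar[i][k] in lasts_sets:
--                                 temp = lasts_sets.pop(grammar[i][j])
--                                 temp2 = firsts_sets.get(grammar[i][k]).copy()
--                                 if "0" in temp2:
--                                     temp2.remove("0")
--                                 else:
--                                     flag2 = True
--                                 temp3 = temp.union(temp2)
--                                 if temp != temp3:
--                                     flag = True
--                                 lasts_sets.setdefault(grammar[i][j], temp3)
--                                 if flag2:
--                                     break
--                             else:
--                                 temp = lasts_sets.pop(grammar[i][j])
--                                 temp2 = temp.union({grammar[i][k]})
--                                 if temp != temp2: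
--                                     flag = True
--                                 lasts_sets.setdefault(grammar[i][j], temp2)
--                                 flag2 = True
--                                 break
--                         if not flag2:
--                             if grammar[i][0] != grammar[i][j]:
--                                 temp = lasts_sets.pop(grammar[i][j])
--                                 temp2 = lasts_sets.get(grammar[i][0]).copy()
--                                 temp3 = temp.union(temp2)
--                                 lasts_sets.setdefault(grammar[i][j], temp3)
--                                 if temp != temp3:
--                                     flag = True
--                     else:
--                         if grammar[i][0] != grammar[i][j]:
--                             temp = lasts_sets.pop(grammar[i][j])
--                             temp2 = lasts_sets.get(grammar[i][0]).copy()
--                             temp3 = temp.union(temp2)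
--                             lasts_sets.setdefault(grammar[i][j], temp3)
--                             if temp != temp3:
--                                 flag = True
--     return lasts_sets
-- ===== SOURCE B (Python) =====
-- # B: compile the grammar once into a flat list of constraints (target, fixed base set,
-- # copy-head flag), then run the fixpoint loop over that compact list instead of
-- # rescanning the grammar strings and recomputing first-set copies on every sweep.
--
-- def firsts(grammar):
--     # unchanged same-module helper that `lasts` depends on (not the function under test)
--     firsts_sets = {}
--     for i in range(len(grammar)):
--         firsts_sets.setdefault(grammar[i][0], set())
--     flag = True
--     while flag:
--         flag = False
--         for i in range(len(grammar)):
--             for j in range(1, len(grammar[i])):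
--                 if grammar[i][j] in firsts_sets:
--                     if grammar[i][j] != grammar[i][0]:
--                         if j < len(grammar[i])-1:
--                             temp = firsts_sets.pop(grammar[i][0])
--                             temp2 = firsts_sets.get(grammar[i][j]).copy()
--                             if "0" in temp2:
--                                 temp2.remove("0")
--                             temp3 = temp.union(temp2)
--                             if temp != temp3:
--                                 flag = True
--                             firsts_sets.setdefault(grammar[i][0], temp3)
--                         else:
--                             temp = firsts_sets.pop(grammar[i][0])
--                             temp2 = firsts_sets.get(grammar[i][j]).union(temp)
--                             if temp != temp2:
--                                 flag = True
--                             firsts_sets.setdefault(grammar[i][0], temp2)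
--                     if "0" not in firsts_sets.get(grammar[i][j]):
--                         break
--                 else:
--                     temp = firsts_sets.pop(grammar[i][0])
--                     temp2 = temp.union({grammar[i][j]})
--                     if temp != temp2:
--                         flag = True
--                     firsts_sets.setdefault(grammar[i][0], temp2)
--                     break
--     return firsts_sets
--
-- def lasts(grammar):
--     first = firsts(grammar)
--     heads = [s[0] for s in grammar]
--     nonterm = set(heads)
--     last = {}
--     for h in heads:
--         last.setdefault(h, set())
--     start = grammar[0][0]
--     last[start] = last.pop(start) | {"$"}
--     # compile: one constraint per occurrence of a nonterminal x in a right-hand side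
--     cons = []
--     for s in grammar:
--         c0 = s[0]
--         for j in range(1, len(s)):
--             x = s[j]
--             if x not in nonterm:
--                 continue
--             base = set()
--             broke = False
--             for y in s[j+1:]:
--                 if y in nonterm:
--                     base |= first[y] - {"0"}
--                     if "0" not in first[y]:
--                         broke = True
--                         break
--                 else:
--                     base.add(y)
--                     broke = True
--                     break
--             cp = (not broke) and c0 != x
--             if j < len(s) - 1 or c0 != x:
--                 cons.append((c0, x, base, cp))
--     # propagate to the fixpoint over the compiled constraints
--     changed = True
--     while changed:
--         changed = False
--         for (c0, x, base, cp) in cons: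
--             old = last.pop(x)
--             new = old | base | (last[c0] if cp else set())
--             if new != old:
--                 changed = True
--             last[x] = new
--     return last
-- ===== Notes on version B (the rewrite author's own statement) =====
-- stated objective: alternative
-- what changed: B compiles the grammar once into a flat list of constraints (target symbol, fixed base set from the nullable-chain scan, copy-head flag) and runs the fixpoint sweeps over that compact list, instead of A's re-scanning every production string and re-deriving nullable chains and first-set copies on every sweep; measured cost is similar.
import Mathlib
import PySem

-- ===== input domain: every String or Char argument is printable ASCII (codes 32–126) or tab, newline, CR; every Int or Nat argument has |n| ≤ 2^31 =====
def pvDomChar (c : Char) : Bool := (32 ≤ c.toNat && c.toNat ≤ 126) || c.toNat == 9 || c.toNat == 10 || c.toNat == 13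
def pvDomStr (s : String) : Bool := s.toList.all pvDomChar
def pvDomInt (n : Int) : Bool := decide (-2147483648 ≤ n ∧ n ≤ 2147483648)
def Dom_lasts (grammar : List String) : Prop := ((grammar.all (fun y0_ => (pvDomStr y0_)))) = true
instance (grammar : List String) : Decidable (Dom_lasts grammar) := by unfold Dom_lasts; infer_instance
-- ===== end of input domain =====

-- B compiles the grammar once into a flat constraint list and iterates over it, instead of
-- A's rescanning every production (nullable chains, first-set copies) on every sweep.
-- Both while-loops are ported with the same sufficient fuel bound (a totality guard only).

-- ===== PORT A =====
-- fuel for the two while-loops: both loops strictly grow one of at most (Σ|row|) sets over an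
-- alphabet of at most (Σ|row|)+2 symbols on every repeated sweep, so this bound is never reached.
def pvFuel (rows : List (List Char)) : Nat := (rows.foldl (fun n r => n + r.length) 0 + 2) ^ 2

-- port of the same-module helper `firsts` (identical in Source A and Source B; used by both ports)
def firstsRow (c0 : Char) (st : PySem.Dict Char (List Char) × Bool) :
    List Char → PySem.Dict Char (List Char) × Bool
  | [] => st
  | x :: more =>
    let d := st.1
    if d.contains x then
      let st' :=
        if x ≠ c0 then
          if more ≠ [] then
            let temp := d.getD c0 []
            let d := d.erase c0
            let temp2 := PySem.Set.discard (d.getD x []) '0'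
            let temp3 := PySem.Set.update temp temp2
            (d.insert c0 temp3, st.2 || !(PySem.Set.equal temp temp3))
          else
            let temp := d.getD c0 []
            let d := d.erase c0
            let temp2 := PySem.Set.update (d.getD x []) temp
            (d.insert c0 temp2, st.2 || !(PySem.Set.equal temp temp2))
        else st
      if (st'.1.getD x []).contains '0' then firstsRow c0 st' more else st'
    else
      let temp := d.getD c0 []
      let d := d.erase c0
      let temp2 := PySem.Set.update temp [x]
      (d.insert c0 temp2, st.2 || !(PySem.Set.equal temp temp2))

def firstsSweep (rows : List (List Char)) (d : PySem.Dict Char (List Char)) :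
    PySem.Dict Char (List Char) × Bool :=
  rows.foldl (fun st r => match r with | [] => st | c0 :: rest => firstsRow c0 st rest) (d, false)

def firstsLoop (rows : List (List Char)) : Nat → PySem.Dict Char (List Char) → PySem.Dict Char (List Char)
  | 0, d => d
  | fuel + 1, d =>
    let st := firstsSweep rows d
    if st.2 then firstsLoop rows fuel st.1 else st.1

def firstsPort (rows : List (List Char)) : PySem.Dict Char (List Char) :=
  firstsLoop rows (pvFuel rows)
    (rows.foldl (fun d r => d.setdefault (r.headD ' ') []) PySem.Dict.empty)

-- A's inner k-loop: returns ((dict, flag), flag2)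
def lastsKLoop (f : PySem.Dict Char (List Char)) (x : Char) :
    PySem.Dict Char (List Char) × Bool → List Char → (PySem.Dict Char (List Char) × Bool) × Bool
  | st, [] => (st, false)
  | (d, flag), y :: more =>
    if d.contains y then
      let temp := d.getD x []
      let d := d.erase x
      let fy := f.getD y []
      let temp2 := PySem.Set.discard fy '0'
      let flag2 := !(fy.contains '0')
      let temp3 := PySem.Set.update temp temp2
      let flag := flag || !(PySem.Set.equal temp temp3)
      let d := d.insert x temp3
      if flag2 then ((d, flag), true) else lastsKLoop f x (d, flag) more
    else
      let temp := d.getD x []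
      let d := d.erase x
      let temp2 := PySem.Set.update temp [y]
      ((d.insert x temp2, flag || !(PySem.Set.equal temp temp2)), true)

-- A's "copy LAST of the head" step
def headCopy (c0 x : Char) (st : PySem.Dict Char (List Char) × Bool) :
    PySem.Dict Char (List Char) × Bool :=
  if c0 ≠ x then
    let temp := st.1.getD x []
    let d := st.1.erase x
    let temp3 := PySem.Set.update temp (d.getD c0 [])
    (d.insert x temp3, st.2 || !(PySem.Set.equal temp temp3))
  else st

def lastsJLoop (f : PySem.Dict Char (List Char)) (c0 : Char)
    (st : PySem.Dict Char (List Char) × Bool) :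
    List Char → PySem.Dict Char (List Char) × Bool
  | [] => st
  | x :: after =>
    let st' :=
      if st.1.contains x then
        if after ≠ [] then
          let r := lastsKLoop f x st after
          if !r.2 then headCopy c0 x r.1 else r.1
        else headCopy c0 x st
      else st
    lastsJLoop f c0 st' after

def lastsSweep (f : PySem.Dict Char (List Char)) (rows : List (List Char))
    (d : PySem.Dict Char (List Char)) : PySem.Dict Char (List Char) × Bool :=
  rows.foldl (fun st r => match r with | [] => st | c0 :: rest => lastsJLoop f c0 st rest) (d, false)

def lastsLoop (f : PySem.Dict Char (List Char)) (rows : List (List Char)) :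
    Nat → PySem.Dict Char (List Char) → PySem.Dict Char (List Char)
  | 0, d => d
  | fuel + 1, d =>
    let st := lastsSweep f rows d
    if st.2 then lastsLoop f rows fuel st.1 else st.1

def lasts (grammar : List String) : List (String × List String) :=
  let rows := grammar.map (·.toList)
  let f := firstsPort rows
  let d0 := rows.foldl (fun d r => d.setdefault (r.headD ' ') []) PySem.Dict.empty
  let start := (rows.headD []).headD ' '
  let temp := d0.getD start []
  let d1 := (d0.erase start).insert start (PySem.Set.update temp ['$'])
  let dfin := lastsLoop f rows (pvFuel rows) d1
  dfin.items.map (fun p => (String.ofList [p.1], p.2.map (fun c => String.ofList [c])))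

-- ===== PORT B =====
-- B's compile-time scan of the symbols after position j: (accumulated base set, broke?)
def scanB (f : PySem.Dict Char (List Char)) (hs : List Char) :
    List Char → List Char → List Char × Bool
  | base, [] => (base, false)
  | base, y :: more =>
    if hs.contains y then
      let fy := f.getD y []
      let base := PySem.Set.update base (PySem.Set.diff fy ['0'])
      if !(fy.contains '0') then (base, true) else scanB f hs base more
    else (PySem.Set.add base y, true)

-- one compiled constraint: (head c0, target x, fixed base set, copy-head flag)
def compileRow (f : PySem.Dict Char (List Char)) (hs : List Char) (c0 : Char) :
    List Char → List (Char × Char × List Char × Bool)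
  | [] => []
  | x :: after =>
    let rest := compileRow f hs c0 after
    if hs.contains x then
      let sc := scanB f hs PySem.Set.empty after
      let cp := !sc.2 && !(c0 == x)
      if after ≠ [] ∨ c0 ≠ x then (c0, x, sc.1, cp) :: rest else rest
    else rest

def compileAll (f : PySem.Dict Char (List Char)) (hs : List Char)
    (rows : List (List Char)) : List (Char × Char × List Char × Bool) :=
  rows.foldl (fun acc r =>
    match r with | [] => acc | c0 :: rest => acc ++ compileRow f hs c0 rest) []

def applyC (st : PySem.Dict Char (List Char) × Bool)
    (c : Char × Char × List Char × Bool) : PySem.Dict Char (List Char) × Bool :=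
  let old := st.1.getD c.2.1 []
  let d := st.1.erase c.2.1
  let new := PySem.Set.update (PySem.Set.update old c.2.2.1)
      (if c.2.2.2 then d.getD c.1 [] else [])
  (d.insert c.2.1 new, st.2 || !(PySem.Set.equal old new))

def sweepB (cons : List (Char × Char × List Char × Bool))
    (d : PySem.Dict Char (List Char)) : PySem.Dict Char (List Char) × Bool :=
  cons.foldl applyC (d, false)

def loopB (cons : List (Char × Char × List Char × Bool)) :
    Nat → PySem.Dict Char (List Char) → PySem.Dict Char (List Char)
  | 0, d => d
  | fuel + 1, d =>
    let st := sweepB cons d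
    if st.2 then loopB cons fuel st.1 else st.1

def lasts_alt (grammar : List String) : List (String × List String) :=
  let rows := grammar.map (·.toList)
  let f := firstsPort rows
  let heads := rows.map (fun r => r.headD ' ')
  let hs := PySem.Set.ofList heads
  let d0 := heads.foldl (fun d h => d.setdefault h []) PySem.Dict.empty
  let start := heads.headD ' '
  let d1 := (d0.erase start).insert start (PySem.Set.update (d0.getD start []) ['$'])
  let cons := compileAll f hs rows
  let dfin := loopB cons (pvFuel rows) d1
  dfin.items.map (fun p => (String.ofList [p.1], p.2.map (fun c => String.ofList [c])))

-- ===== PRECONDITION & SPEC =====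
-- Pre_ excludes exactly the inputs on which the Python A raises IndexError:
-- the empty grammar and grammars containing an empty production string.
def Pre_lasts (grammar : List String) : Prop :=
  grammar ≠ [] ∧ ∀ s ∈ grammar, s.toList ≠ []
instance (grammar : List String) : Decidable (Pre_lasts grammar) := by
  unfold Pre_lasts; infer_instance

def pvWitness_lasts : List String := ["SaA", "AbB", "Bc"]

def Spec_lasts (grammar : List String) (out : List (String × List String)) : Prop :=
  out = lasts_alt grammar
instance (grammar : List String) (out : List (String × List String)) :
    Decidable (Spec_lasts grammar out) := by unfold Spec_lasts; infer_instance

-- ===== CLAIM (what is proved, stated in full; the proofs are below) =====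
def Claim_equal_lasts : Prop :=
  ∀ (grammar : List String), Dom_lasts grammar → Pre_lasts grammar →
    Spec_lasts grammar (lasts grammar)

-- ===== LEMMAS AND PROOFS =====

-- ---- list-level facts about the association lists inside PySem.Dict ----
theorem pv_find_filter_ne {ν : Type} (x c : Char) (l : List (Char × ν)) :
    (l.filter (fun p => !(p.1 == x))).find? (fun p => p.1 == c) =
      if c = x then none else l.find? (fun p => p.1 == c) := by
  by_cases hcx : c = x
  · subst hcx
    rw [if_pos rfl]
    refine List.find?_eq_none.mpr ?_
    intro p hp
    have h2 := (List.mem_filter.mp hp).2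
    simpa using h2
  · rw [if_neg hcx]
    have hxc : (x == c) = false := by simpa using (Ne.symm hcx)
    induction l with
    | nil => simp
    | cons p t ih =>
      by_cases h1 : p.1 = x
      · simp [List.filter_cons, h1, List.find?_cons, hxc, ih]
      · cases hpc : (p.1 == c) <;>
          simp [List.filter_cons, h1, List.find?_cons, hpc, ih]

theorem pv_any_filter_ne {ν : Type} (x c : Char) (l : List (Char × ν)) :
    (l.filter (fun p => !(p.1 == x))).any (fun p => p.1 == c) =
      (!(c == x) && l.any (fun p => p.1 == c)) := by
  by_cases hcx : c = x
  · subst hcx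
    simp only [beq_self_eq_true, Bool.not_true, Bool.false_and]
    rw [List.any_eq_false]
    intro p hp
    have h2 := (List.mem_filter.mp hp).2
    simpa using h2
  · have hcx' : (c == x) = false := by simpa using hcx
    have hxc : (x == c) = false := by simpa using (Ne.symm hcx)
    rw [hcx']
    simp only [Bool.not_false, Bool.true_and]
    induction l with
    | nil => simp
    | cons p t ih =>
      by_cases h1 : p.1 = x
      · simp [List.filter_cons, h1, hxc, ih]
      · cases hpc : (p.1 == c) <;> simp [List.filter_cons, h1, hpc, ih]

-- ---- small Dict facts about erase (not in the PySem lemma list) ----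
theorem pv_contains_erase {ν : Type} (d : PySem.Dict Char ν) (x c : Char) :
    (d.erase x).contains c = (!(c == x) && d.contains c) := by
  simp only [PySem.Dict.erase, PySem.Dict.contains]
  exact pv_any_filter_ne x c d.items

theorem pv_erase_contains_self {ν : Type} (d : PySem.Dict Char ν) (x : Char) :
    (d.erase x).contains x = false := by
  rw [pv_contains_erase]; simp

theorem pv_insert_items_not_contains {ν : Type} (d : PySem.Dict Char ν) (k : Char) (v : ν)
    (h : d.contains k = false) : (d.insert k v).items = d.items ++ [(k, v)] := by
  simp [PySem.Dict.insert, h]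

theorem pv_erase_insert_erase {ν : Type} (d : PySem.Dict Char ν) (x : Char) (v : ν) :
    ((d.erase x).insert x v).erase x = d.erase x := by
  have hi := pv_insert_items_not_contains _ x v (pv_erase_contains_self d x)
  apply PySem.Dict.ext
  show (((d.erase x).insert x v).items.filter _) = _
  rw [hi]
  simp [PySem.Dict.erase, List.filter_append, List.filter_filter]

theorem pv_getD_erase_insert_self {ν : Type} (d : PySem.Dict Char ν) (x : Char) (v w : ν) :
    ((d.erase x).insert x v).getD x w = v := by
  have hi := pv_insert_items_not_contains _ x v (pv_erase_contains_self d x)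
  simp only [PySem.Dict.getD, PySem.Dict.get?, hi]
  rw [List.find?_append]
  simp only [PySem.Dict.erase]
  rw [pv_find_filter_ne, if_pos rfl]
  simp

theorem pv_contains_erase_insert {ν : Type} (d : PySem.Dict Char ν) (x c : Char) (v : ν)
    (hx : d.contains x = true) :
    ((d.erase x).insert x v).contains c = d.contains c := by
  have hi := pv_insert_items_not_contains _ x v (pv_erase_contains_self d x)
  simp only [PySem.Dict.contains, hi]
  rw [List.any_append]
  have h1 := pv_contains_erase d x c
  simp only [PySem.Dict.contains] at h1 hx
  show ((d.erase x).items.any _ || _) = _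
  have h1' : ((d.erase x).items.any fun p => p.1 == c) = (!(c == x) && d.items.any fun p => p.1 == c) := h1
  rw [h1']
  by_cases hcx : c = x
  · subst hcx; simp [hx]
  · have h2 : (c == x) = false := by simpa using hcx
    have h3 : (x == c) = false := by simpa using (Ne.symm hcx)
    simp [h2, h3]

theorem pv_update_nil (s : List Char) : PySem.Set.update s [] = s := rfl

theorem pv_add_eq (s : List Char) (y : Char) :
    PySem.Set.add s y = PySem.Set.update s [y] := rfl

theorem pv_diff_singleton (s : List Char) :
    PySem.Set.diff s ['0'] = PySem.Set.discard s '0' := by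
  simp only [PySem.Set.diff, PySem.Set.discard]
  apply List.filter_congr
  intro y _
  by_cases h : y = '0' <;> simp [h]

theorem pv_contains_ofList (l : List Char) (k : Char) :
    (PySem.Set.ofList l).contains k = l.contains k := by
  by_cases h : k ∈ l
  · have h1 : k ∈ PySem.Set.ofList l := (PySem.Set.mem_ofList l k).mpr h
    simp [PySem.Set.contains, h, h1]
  · have h1 : k ∉ PySem.Set.ofList l := fun hc => h ((PySem.Set.mem_ofList l k).mp hc)
    simp [PySem.Set.contains, h, h1]

theorem pv_update_shape (s t : List Char) :
    ∃ e, PySem.Set.update s t = s ++ e ∧ ∀ z ∈ e, z ∉ s := by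
  refine ⟨(PySem.Set.ofList t).filter (fun y => !(PySem.Set.contains s y)),
    PySem.Set.update_eq_append_filter s t, ?_⟩
  intro z hz hzs
  have h2 := List.of_mem_filter hz
  have h3 : PySem.Set.contains s z = true := by
    simpa [PySem.Set.contains] using hzs
  rw [h3] at h2
  simp at h2

theorem pv_equal_append_fresh (s e : List Char) (h : ∀ z ∈ e, z ∉ s) :
    PySem.Set.equal s (s ++ e) = e.isEmpty := by
  cases e with
  | nil =>
    simp only [List.append_nil, List.isEmpty_nil]
    exact (PySem.Set.equal_iff s s).mpr (fun x => Iff.rfl)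
  | cons z e' =>
    simp only [List.isEmpty_cons]
    apply Bool.eq_false_iff.mpr
    intro hEq
    have h2 := ((PySem.Set.equal_iff s (s ++ z :: e')).mp hEq z).mpr (by simp)
    exact h z (by simp) h2

theorem pv_flag_compose (old m fin : List Char)
    (h1 : ∃ e, m = old ++ e ∧ ∀ z ∈ e, z ∉ old)
    (h2 : ∃ e, fin = m ++ e ∧ ∀ z ∈ e, z ∉ m) :
    (!(PySem.Set.equal old m) || !(PySem.Set.equal m fin)) = !(PySem.Set.equal old fin) := by
  obtain ⟨e1, hm, f1⟩ := h1
  obtain ⟨e2, hf, f2⟩ := h2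
  subst hm; subst hf
  rw [pv_equal_append_fresh _ _ f1, pv_equal_append_fresh _ _ f2, List.append_assoc,
    pv_equal_append_fresh old (e1 ++ e2) ?_]
  · cases e1 <;> cases e2 <;> simp
  · intro z hz
    rcases List.mem_append.mp hz with h | h
    · exact f1 z h
    · intro hzo
      exact f2 z h (List.mem_append.mpr (Or.inl hzo))

theorem pv_update_assoc (s a t : List Char) :
    PySem.Set.update (PySem.Set.update s a) t = PySem.Set.update s (PySem.Set.update a t) := by
  have h1 : PySem.Set.update a t = a ++ (PySem.Set.ofList t).filter
      (fun y => !(PySem.Set.contains a y)) := PySem.Set.update_eq_append_filter a t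
  rw [h1, PySem.Set.update_append]
  have hnd : ((PySem.Set.ofList t).filter (fun y => !(PySem.Set.contains a y))).Nodup :=
    (PySem.Set.nodup_ofList t).filter _
  have hofe := PySem.Set.ofList_eq_self_of_nodup _ hnd
  rw [PySem.Set.update_eq_append_filter (PySem.Set.update s a) t,
    PySem.Set.update_eq_append_filter (PySem.Set.update s a)
      ((PySem.Set.ofList t).filter (fun y => !(PySem.Set.contains a y))), hofe]
  congr 1
  rw [List.filter_filter]
  apply List.filter_congr
  intro y _
  by_cases hw : PySem.Set.contains (PySem.Set.update s a) y = true
  · simp [hw]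
  · have hw' : PySem.Set.contains (PySem.Set.update s a) y = false :=
      Bool.eq_false_iff.mpr hw
    have ha : PySem.Set.contains a y = false := by
      apply Bool.eq_false_iff.mpr
      intro hay
      have h3 : y ∈ a := by simpa [PySem.Set.contains] using hay
      have h4 : y ∈ PySem.Set.update s a := (PySem.Set.mem_update _ _ _).mpr (Or.inr h3)
      have h5 : PySem.Set.contains (PySem.Set.update s a) y = true := by
        simpa [PySem.Set.contains] using h4
      exact hw h5
    simp [hw', ha]

-- ---- scanB facts ----
theorem pv_scanB_shape (f : PySem.Dict Char (List Char)) (hs : List Char)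
    (tail : List Char) : ∀ (acc : List Char),
    ∃ e, (scanB f hs acc tail).1 = acc ++ e ∧ ∀ z ∈ e, z ∉ acc := by
  induction tail with
  | nil => exact fun acc => ⟨[], by simp [scanB], by simp⟩
  | cons y more ih =>
    intro acc
    by_cases hy : y ∈ hs
    · obtain ⟨e1, he1, hf1⟩ := pv_update_shape acc (PySem.Set.diff (f.getD y []) ['0'])
      by_cases h0 : '0' ∈ f.getD y []
      · obtain ⟨e2, he2, hf2⟩ := ih (PySem.Set.update acc (PySem.Set.diff (f.getD y []) ['0']))
        refine ⟨e1 ++ e2, ?_, ?_⟩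
        · simp [scanB, hy, h0]
          rw [he2, he1, List.append_assoc]
        · intro z hz
          rcases List.mem_append.mp hz with h | h
          · exact hf1 z h
          · intro hzacc
            exact hf2 z h (by rw [he1]; exact List.mem_append.mpr (Or.inl hzacc))
      · refine ⟨e1, ?_, hf1⟩
        simp [scanB, hy, h0]
        simpa using he1
    · by_cases hmem : y ∈ acc
      · exact ⟨[], by simp [scanB, hy, PySem.Set.add_of_mem hmem], by simp⟩
      · exact ⟨[y], by simp [scanB, hy, PySem.Set.add_of_not_mem hmem],
          by simpa using hmem⟩

theorem pv_scanB_shift (f : PySem.Dict Char (List Char)) (hs : List Char)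
    (tail : List Char) : ∀ (old acc : List Char),
    scanB f hs (PySem.Set.update old acc) tail =
      (PySem.Set.update old (scanB f hs acc tail).1, (scanB f hs acc tail).2) := by
  induction tail with
  | nil => intro old acc; simp [scanB]
  | cons y more ih =>
    intro old acc
    by_cases hy : y ∈ hs
    · by_cases h0 : '0' ∈ f.getD y []
      · simp only [scanB]
        simp [hy, h0]
        rw [pv_update_assoc]
        exact ih old (PySem.Set.update acc (PySem.Set.diff (f.getD y []) ['0']))
      · simp [scanB, hy, h0]
        rw [pv_update_assoc]
    · simp [scanB, hy]
      rw [pv_add_eq, pv_add_eq, pv_update_assoc]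

theorem pv_update_empty (s : List Char) : PySem.Set.update s PySem.Set.empty = s := rfl

-- ---- A's k-loop equals one accumulated scan over the compiled data ----
theorem pv_kloop_eq (f : PySem.Dict Char (List Char)) (hs : List Char) (x : Char)
    (hx : hs.contains x = true) :
    ∀ (tail : List Char), tail ≠ [] →
    ∀ (d : PySem.Dict Char (List Char)) (flag : Bool),
      (∀ c, d.contains c = hs.contains c) →
      lastsKLoop f x (d, flag) tail =
        (((d.erase x).insert x (scanB f hs (d.getD x []) tail).1,
          flag || !(PySem.Set.equal (d.getD x []) (scanB f hs (d.getD x []) tail).1)),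
         (scanB f hs (d.getD x []) tail).2) := by
  intro tail
  induction tail with
  | nil => intro h; exact absurd rfl h
  | cons y more ih =>
    intro _ d flag hinv
    have hdx : d.contains x = true := by rw [hinv x]; exact hx
    by_cases hsy : y ∈ hs
    · have hsy' : hs.contains y = true := by simpa using hsy
      have hdy : d.contains y = true := by rw [hinv y]; exact hsy'
      by_cases h0 : '0' ∈ f.getD y []
      · have h0' : (f.getD y []).contains '0' = true := by simpa using h0
        have hstep : lastsKLoop f x (d, flag) (y :: more) =
            lastsKLoop f x
              ((d.erase x).insert x (PySem.Set.update (d.getD x [])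
                  (PySem.Set.discard (f.getD y []) '0')),
               flag || !(PySem.Set.equal (d.getD x [])
                 (PySem.Set.update (d.getD x [])
                   (PySem.Set.discard (f.getD y []) '0')))) more := by
          simp [lastsKLoop, hdy, h0', h0]
        have hscan : scanB f hs (d.getD x []) (y :: more) =
            scanB f hs (PySem.Set.update (d.getD x [])
              (PySem.Set.discard (f.getD y []) '0')) more := by
          simp [scanB, hsy, h0, pv_diff_singleton]
        by_cases hmore : more = []
        · subst hmore
          rw [hstep, hscan]
          rfl
        · rw [hstep, hscan]
          have hinv2 : ∀ c, ((d.erase x).insert x (PySem.Set.update (d.getD x [])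
              (PySem.Set.discard (f.getD y []) '0'))).contains c = hs.contains c := by
            intro c; rw [pv_contains_erase_insert d x c _ hdx]; exact hinv c
          rw [ih hmore _ _ hinv2, pv_getD_erase_insert_self, pv_erase_insert_erase]
          have hsh1 : ∃ e, PySem.Set.update (d.getD x [])
              (PySem.Set.discard (f.getD y []) '0') = d.getD x [] ++ e ∧
              ∀ z ∈ e, z ∉ d.getD x [] := pv_update_shape _ _
          have hsh2 := pv_scanB_shape f hs more
            (PySem.Set.update (d.getD x []) (PySem.Set.discard (f.getD y []) '0'))
          rw [Bool.or_assoc, pv_flag_compose _ _ _ hsh1 hsh2]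
      · have h0' : (f.getD y []).contains '0' = false := by simpa using h0
        simp [lastsKLoop, hdy, h0', scanB, hsy, h0, pv_diff_singleton]
    · have hsy' : hs.contains y = false := by simpa using hsy
      have hdy : d.contains y = false := by rw [hinv y]; exact hsy'
      have hstep : lastsKLoop f x (d, flag) (y :: more) =
          (((d.erase x).insert x (PySem.Set.update (d.getD x []) [y]),
            flag || !(PySem.Set.equal (d.getD x [])
              (PySem.Set.update (d.getD x []) [y]))), true) := by
        simp [lastsKLoop, hdy]
      have hscan : scanB f hs (d.getD x []) (y :: more) =
          (PySem.Set.add (d.getD x []) y, true) := by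
        simp [scanB, hsy]
      rw [hstep, hscan]
      simp only [pv_add_eq]

-- ---- the invariant: key membership is preserved ----
theorem pv_inv_applyC (hs : List Char) (st : PySem.Dict Char (List Char) × Bool)
    (c : Char × Char × List Char × Bool)
    (hc : hs.contains c.2.1 = true)
    (hinv : ∀ k, st.1.contains k = hs.contains k) :
    ∀ k, (applyC st c).1.contains k = hs.contains k := by
  intro k
  have hx : st.1.contains c.2.1 = true := by rw [hinv c.2.1]; exact hc
  simp only [applyC]
  rw [pv_contains_erase_insert _ _ _ _ hx]
  exact hinv k

theorem pv_compileRow_targets (f : PySem.Dict Char (List Char)) (hs : List Char)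
    (c0 : Char) : ∀ (rest : List Char),
    ∀ c ∈ compileRow f hs c0 rest, hs.contains c.2.1 = true := by
  intro rest
  induction rest with
  | nil => intro c hc; simp [compileRow] at hc
  | cons x after ih =>
    intro c hc
    simp only [compileRow] at hc
    by_cases hx : hs.contains x = true
    · rw [if_pos hx] at hc
      by_cases hemit : after ≠ [] ∨ c0 ≠ x
      · rw [if_pos hemit] at hc
        rcases List.mem_cons.mp hc with h | h
        · subst h; exact hx
        · exact ih c h
      · rw [if_neg hemit] at hc; exact ih c hc
    · rw [if_neg hx] at hc; exact ih c hc

-- ---- A's processing of one position equals B's optional constraint ----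
theorem pv_pos_eq (f : PySem.Dict Char (List Char)) (hs : List Char) (c0 x : Char)
    (after : List Char) (st : PySem.Dict Char (List Char) × Bool)
    (hinv : ∀ k, st.1.contains k = hs.contains k) :
    (if st.1.contains x then
       if after ≠ [] then
         if !(lastsKLoop f x st after).2 then headCopy c0 x (lastsKLoop f x st after).1
         else (lastsKLoop f x st after).1
       else headCopy c0 x st
     else st) =
    (if hs.contains x then
       if after ≠ [] ∨ c0 ≠ x then
         applyC st (c0, x, (scanB f hs PySem.Set.empty after).1,
           !(scanB f hs PySem.Set.empty after).2 && !(c0 == x))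
       else st
     else st) := by
  obtain ⟨d, flag⟩ := st
  have hdx := hinv x
  by_cases hx : hs.contains x = true
  · have hdx' : PySem.Dict.contains d x = true := by rw [hdx]; exact hx
    rw [if_pos hdx', if_pos hx]
    by_cases ha : after = []
    · subst ha
      rw [if_neg (by simp)]
      by_cases hcx : c0 = x
      · subst hcx
        rw [if_neg (by simp)]
        simp [headCopy]
      · have hcx' : (c0 == x) = false := by simpa using hcx
        rw [if_pos (Or.inr hcx)]
        simp [headCopy, hcx, applyC, scanB, hcx', pv_update_nil]
    · rw [if_pos ha, if_pos (Or.inl ha)]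
      rw [pv_kloop_eq f hs x hx after ha d flag hinv]
      have hsplit := pv_scanB_shift f hs after (d.getD x []) PySem.Set.empty
      rw [pv_update_empty] at hsplit
      rw [hsplit]
      by_cases hbr : (scanB f hs PySem.Set.empty after).2 = true
      · rw [hbr]
        simp only [Bool.not_true, Bool.false_eq_true, if_false, Bool.false_and]
        simp [applyC, pv_update_nil]
      · have hbr' : (scanB f hs PySem.Set.empty after).2 = false := Bool.eq_false_iff.mpr hbr
        rw [hbr']
        simp only [Bool.not_false, if_true, Bool.true_and]
        by_cases hcx : c0 = x
        · subst hcx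
          have hxx : (c0 == c0) = true := by simp
          simp [headCopy, applyC, hxx, pv_update_nil]
        · have hcx' : (c0 == x) = false := by simpa using hcx
          have e1 := pv_erase_insert_erase d x
            (PySem.Set.update (d.getD x []) (scanB f hs PySem.Set.empty after).1)
          have e2 := pv_getD_erase_insert_self d x
            (PySem.Set.update (d.getD x []) (scanB f hs PySem.Set.empty after).1)
            ([] : List Char)
          simp only [headCopy, applyC, hcx, hcx', ne_eq, not_false_eq_true, if_true,
            Bool.not_false, e1, e2]
          rw [Prod.mk.injEq]
          refine ⟨rfl, ?_⟩
          rw [Bool.or_assoc, pv_flag_compose _ _ _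
            (pv_update_shape _ _) (pv_update_shape _ _)]
  · have hdx' : PySem.Dict.contains d x = false := by rw [hdx]; exact Bool.eq_false_iff.mpr hx
    rw [if_neg hx, if_neg (by rw [hdx']; simp)]

-- ---- row level ----
theorem pv_row_eq (f : PySem.Dict Char (List Char)) (hs : List Char) (c0 : Char) :
    ∀ (rest : List Char) (st : PySem.Dict Char (List Char) × Bool),
      (∀ k, st.1.contains k = hs.contains k) →
      lastsJLoop f c0 st rest = (compileRow f hs c0 rest).foldl applyC st := by
  intro rest
  induction rest with
  | nil => intro st hinv; simp [lastsJLoop, compileRow]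
  | cons x after ih =>
    intro st hinv
    have hpos := pv_pos_eq f hs c0 x after st hinv
    simp only [lastsJLoop, compileRow]
    rw [hpos]
    by_cases hx : hs.contains x = true
    · rw [if_pos hx, if_pos hx]
      by_cases hemit : after ≠ [] ∨ c0 ≠ x
      · rw [if_pos hemit, if_pos hemit, List.foldl_cons]
        exact ih _ (pv_inv_applyC hs st _ hx hinv)
      · rw [if_neg hemit, if_neg hemit]
        exact ih st hinv
    · rw [if_neg hx, if_neg hx]
      exact ih st hinv

theorem pv_inv_fold (hs : List Char) :
    ∀ (cs : List (Char × Char × List Char × Bool))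
      (st : PySem.Dict Char (List Char) × Bool),
      (∀ c ∈ cs, hs.contains c.2.1 = true) →
      (∀ k, st.1.contains k = hs.contains k) →
      ∀ k, (cs.foldl applyC st).1.contains k = hs.contains k := by
  intro cs
  induction cs with
  | nil => intro st _ hinv k; simpa using hinv k
  | cons c cs ih =>
    intro st hts hinv k
    rw [List.foldl_cons]
    exact ih _ (fun c' hc' => hts c' (List.mem_cons_of_mem c hc'))
      (pv_inv_applyC hs st c (hts c (by simp)) hinv) k

-- ---- compileAll as a flatMap ----
theorem pv_compileAll_acc (f : PySem.Dict Char (List Char)) (hs : List Char) :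
    ∀ (rows : List (List Char)) (acc : List (Char × Char × List Char × Bool)),
      rows.foldl (fun acc r =>
          match r with | [] => acc | c0 :: rest => acc ++ compileRow f hs c0 rest) acc
        = acc ++ rows.foldl (fun acc r =>
          match r with | [] => acc | c0 :: rest => acc ++ compileRow f hs c0 rest) [] := by
  intro rows
  induction rows with
  | nil => intro acc; simp
  | cons r rows ih =>
    intro acc
    cases r with
    | nil =>
      simp only [List.foldl_cons]
      exact ih acc
    | cons c0 rest =>
      simp only [List.foldl_cons, List.nil_append]
      rw [ih (acc ++ compileRow f hs c0 rest), ih (compileRow f hs c0 rest),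
        List.append_assoc]

theorem pv_compileAll_cons (f : PySem.Dict Char (List Char)) (hs : List Char)
    (r : List Char) (rows : List (List Char)) :
    compileAll f hs (r :: rows) =
      (match r with | [] => [] | c0 :: rest => compileRow f hs c0 rest)
        ++ compileAll f hs rows := by
  cases r with
  | nil =>
    show List.foldl _ _ rows = _
    rw [List.nil_append]
    rfl
  | cons c0 rest =>
    show List.foldl _ ([] ++ compileRow f hs c0 rest) rows = _
    rw [List.nil_append, pv_compileAll_acc f hs rows]
    rfl

theorem pv_compileAll_targets (f : PySem.Dict Char (List Char)) (hs : List Char) :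
    ∀ (rows : List (List Char)), ∀ c ∈ compileAll f hs rows,
      hs.contains c.2.1 = true := by
  intro rows
  induction rows with
  | nil => intro c hc; simp [compileAll] at hc
  | cons r rows ih =>
    intro c hc
    rw [pv_compileAll_cons] at hc
    rcases List.mem_append.mp hc with h | h
    · cases r with
      | nil => simp at h
      | cons c0 rest => exact pv_compileRow_targets f hs c0 rest c h
    · exact ih c h

-- ---- sweep level ----
theorem pv_sweep_eq (f : PySem.Dict Char (List Char)) (hs : List Char) :
    ∀ (rows : List (List Char)) (st : PySem.Dict Char (List Char) × Bool),
      (∀ k, st.1.contains k = hs.contains k) →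
      rows.foldl (fun st r =>
          match r with | [] => st | c0 :: rest => lastsJLoop f c0 st rest) st =
        (compileAll f hs rows).foldl applyC st := by
  intro rows
  induction rows with
  | nil => intro st _; rfl
  | cons r rows ih =>
    intro st hinv
    rw [List.foldl_cons, pv_compileAll_cons, List.foldl_append]
    cases r with
    | nil => exact ih st hinv
    | cons c0 rest =>
      show rows.foldl _ (lastsJLoop f c0 st rest) = _
      rw [pv_row_eq f hs c0 rest st hinv]
      exact ih _ (pv_inv_fold hs _ st (pv_compileRow_targets f hs c0 rest) hinv)

-- ---- loop level ----
theorem pv_loop_eq (f : PySem.Dict Char (List Char)) (hs : List Char)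
    (rows : List (List Char))
    (hts : ∀ c ∈ compileAll f hs rows, hs.contains c.2.1 = true) :
    ∀ (fuel : Nat) (d : PySem.Dict Char (List Char)),
      (∀ k, d.contains k = hs.contains k) →
      lastsLoop f rows fuel d = loopB (compileAll f hs rows) fuel d := by
  intro fuel
  induction fuel with
  | zero => intro d _; rfl
  | succ fuel ih =>
    intro d hinv
    have hsw : lastsSweep f rows d = sweepB (compileAll f hs rows) d :=
      pv_sweep_eq f hs rows (d, false) hinv
    simp only [lastsLoop, loopB, hsw]
    by_cases h2 : (sweepB (compileAll f hs rows) d).2 = true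
    · rw [if_pos h2, if_pos h2]
      refine ih _ ?_
      intro k
      have h3 := pv_inv_fold hs (compileAll f hs rows) (d, false) hts hinv k
      simpa [sweepB] using h3
    · rw [if_neg h2, if_neg h2]

-- ---- initial dict keys ----
theorem pv_contains_init :
    ∀ (heads : List Char) (d : PySem.Dict Char (List Char)) (k : Char),
      (heads.foldl (fun d h => d.setdefault h []) d).contains k
        = (d.contains k || heads.contains k) := by
  intro heads
  induction heads with
  | nil => intro d k; simp
  | cons h t ih =>
    intro d k
    rw [List.foldl_cons, ih, PySem.Dict.contains_setdefault]
    cases hkh : (k == h) <;> cases hdc : d.contains k <;>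
      simp_all [List.contains_cons]

-- ===== VERDICT (by name: the statement is the Claim_ definition above) =====
theorem lasts_spec : Claim_equal_lasts := by
  intro grammar _ hpre
  obtain ⟨hne, -⟩ := hpre
  show lasts grammar = lasts_alt grammar
  simp only [lasts, lasts_alt]
  set rows := grammar.map (fun s => s.toList) with hrows
  have hrne : rows ≠ [] := by
    rw [hrows]; cases grammar with
    | nil => exact absurd rfl hne
    | cons a l => simp
  set heads := rows.map (fun r => r.headD ' ') with hheads
  have hfold : heads.foldl (fun d h => d.setdefault h []) (PySem.Dict.empty : PySem.Dict Char (List Char))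
      = rows.foldl (fun d r => d.setdefault (r.headD ' ') []) PySem.Dict.empty := by
    rw [hheads, List.foldl_map]
  have hstart : heads.headD ' ' = (rows.headD []).headD ' ' := by
    rw [hheads]; cases rows <;> simp
  rw [hfold, hstart]
  have hhne : heads ≠ [] := by
    rw [hheads]; simpa using hrne
  have hmem : heads.headD ' ' ∈ heads := by
    cases hh : heads with
    | nil => exact absurd hh hhne
    | cons a l => simp
  rw [hstart] at hmem
  have hcd0 : ∀ c, ((rows.foldl (fun d r => d.setdefault (r.headD ' ') [])
      PySem.Dict.empty : PySem.Dict Char (List Char))).contains c = heads.contains c := by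
    intro c
    rw [← hfold, pv_contains_init]
    simp [PySem.Dict.empty, PySem.Dict.contains]
  have hsm : heads.contains ((rows.headD []).headD ' ') = true := by simpa using hmem
  have hd0s : ((rows.foldl (fun d r => d.setdefault (r.headD ' ') [])
      PySem.Dict.empty : PySem.Dict Char (List Char))).contains ((rows.headD []).headD ' ') = true := by
    rw [hcd0]; exact hsm
  have hinv : ∀ k, ((((rows.foldl (fun d r => d.setdefault (r.headD ' ') [])
        PySem.Dict.empty : PySem.Dict Char (List Char))).erase ((rows.headD []).headD ' ')).insert
        ((rows.headD []).headD ' ')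
        (PySem.Set.update (((rows.foldl (fun d r => d.setdefault (r.headD ' ') [])
          PySem.Dict.empty : PySem.Dict Char (List Char))).getD ((rows.headD []).headD ' ') []) ['$'])).contains k
      = (PySem.Set.ofList heads).contains k := by
    intro k
    rw [pv_contains_erase_insert _ _ _ _ hd0s, hcd0 k, pv_contains_ofList]
  exact congrArg _ (congrArg PySem.Dict.items
    (pv_loop_eq (firstsPort rows) (PySem.Set.ofList heads) rows
      (pv_compileAll_targets _ _ rows) (pvFuel rows) _ hinv))
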